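-- pv_equiv track=rewrite | github.com/spartan289/PycharmProjects | kickstart2021/convertstring.py | convert
-- ===== SOURCE A (Python) =====
-- def convert(s,f):
--     count=0
--     for i in s:
--         mini = 100000
--         for j in f:
--             cur = abs(ord(j)-ord(i))
--             if cur>=13:
--                 cur=abs(cur-26)
--             if cur<mini:
--                 mini=cur
--         count+=mini
--     return count
-- ===== SOURCE B (Python) =====
-- def _min_dist(c, f):
--     best = 100000
--     for j in f:
--         d = abs(ord(j) - ord(c))
--         if d >= 13:
--             d = abs(d - 26)
--         best = min(best, d)
--     return best
--
-- def convert(s, f):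
--     freq = {}
--     for c in s:
--         freq[c] = freq.get(c, 0) + 1
--     total = 0
--     for c, n in freq.items():
--         total += n * _min_dist(c, f)
--     return total
-- ===== Notes on version B (the rewrite author's own statement) =====
-- stated objective: faster
-- what changed: B first builds a frequency table of s, then scans f only once per DISTINCT character of s (at most 95 under ASCII) and sums count*min-distance, instead of A's full scan of f for every character of s.
import Mathlib
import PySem

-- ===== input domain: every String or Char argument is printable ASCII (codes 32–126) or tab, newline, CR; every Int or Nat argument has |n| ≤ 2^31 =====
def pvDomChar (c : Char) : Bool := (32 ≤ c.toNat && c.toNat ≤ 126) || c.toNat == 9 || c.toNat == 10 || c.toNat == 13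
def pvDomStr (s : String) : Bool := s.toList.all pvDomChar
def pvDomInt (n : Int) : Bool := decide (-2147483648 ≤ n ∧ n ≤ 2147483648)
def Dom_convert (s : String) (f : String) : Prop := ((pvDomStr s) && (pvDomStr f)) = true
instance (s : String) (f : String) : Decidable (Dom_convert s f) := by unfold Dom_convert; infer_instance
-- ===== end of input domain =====

-- B groups s into a character-frequency table and scans f once per distinct character of s
-- instead of once per character of s (objective: faster; a timing run measures it).

-- ===== PORT A =====
def convert (s : String) (f : String) : Int :=
  s.toList.foldl (fun count i =>
    let mini := f.toList.foldl (fun mini j =>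
      let cur := |((j.toNat : Int)) - ((i.toNat : Int))|
      let cur := if cur ≥ 13 then |cur - 26| else cur
      if cur < mini then cur else mini) 100000
    count + mini) 0

-- ===== PORT B =====
-- port of Source B's helper _min_dist
def minDist (c : Char) (f : List Char) : Int :=
  f.foldl (fun best j =>
    let d := |((j.toNat : Int)) - ((c.toNat : Int))|
    let d := if d ≥ 13 then |d - 26| else d
    min best d) 100000

def convert_alt (s : String) (f : String) : Int :=
  let freq := s.toList.foldl (fun d c => d.insert c (d.getD c 0 + 1))
    (PySem.Dict.empty : PySem.Dict Char Int)
  freq.items.foldl (fun total p => total + p.2 * minDist p.1 f.toList) 0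

-- ===== PRECONDITION & SPEC =====
def Spec_convert (s : String) (f : String) (out : Int) : Prop := out = convert_alt s f
instance (s : String) (f : String) (out : Int) : Decidable (Spec_convert s f out) := by unfold Spec_convert; infer_instance

-- ===== CLAIM (what is proved, stated in full; the proofs are below) =====
def Claim_equal_convert : Prop := ∀ (s : String) (f : String), Dom_convert s f → Spec_convert s f (convert s f)

-- ===== LEMMAS AND PROOFS =====

-- A's inner min-loop (if cur < mini) computes the same as B's (min best d), from any start
lemma inner_eq (f : List Char) (c : Char) : ∀ (m : Int),
    f.foldl (fun mini j =>
      let cur := |((j.toNat : Int)) - ((c.toNat : Int))|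
      let cur := if cur ≥ 13 then |cur - 26| else cur
      if cur < mini then cur else mini) m
    = f.foldl (fun best j =>
      let d := |((j.toNat : Int)) - ((c.toNat : Int))|
      let d := if d ≥ 13 then |d - 26| else d
      min best d) m := by
  induction f with
  | nil => intro m; rfl
  | cons j f ih =>
    intro m
    simp only [List.foldl_cons]
    rw [ih]
    congr 1
    rw [min_def]
    split_ifs <;> omega

-- accumulate-and-add fold is a sum
lemma foldl_add_eq_sum (g : α → Int) (xs : List α) : ∀ (init : Int),
    xs.foldl (fun acc x => acc + g x) init = init + (xs.map g).sum := by
  induction xs with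
  | nil => intro init; simp
  | cons x xs ih => intro init; simp [List.foldl_cons, ih, add_assoc]

lemma sum_ite_mem (g : Char → Int) (x : Char) : ∀ (ys : List Char), ys.Nodup → x ∈ ys →
    (ys.map (fun k => if k = x then g k else 0)).sum = g x := by
  intro ys
  induction ys with
  | nil => intro _ h; simp at h
  | cons y ys ih =>
    intro hnd hmem
    rcases List.nodup_cons.mp hnd with ⟨hy, hnd'⟩
    rcases List.mem_cons.mp hmem with h | h
    · subst h
      have : (ys.map (fun k => if k = x then g k else 0)).sum = 0 := by
        apply List.sum_eq_zero
        intro v hv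
        rcases List.mem_map.mp hv with ⟨k, hk, rfl⟩
        have : k ≠ x := fun he => hy (he ▸ hk)
        simp [this]
      simp [this]
    · have hyx : y ≠ x := fun he => hy (he ▸ h)
      simp [hyx, ih hnd' h]

-- grouping: summing g over xs equals summing count·g over any duplicate-free superset of xs
lemma group_sum (g : Char → Int) (ys : List Char) (hnd : ys.Nodup) :
    ∀ (xs : List Char), (∀ x ∈ xs, x ∈ ys) →
    (ys.map (fun k => (xs.count k : Int) * g k)).sum = (xs.map g).sum := by
  intro xs
  induction xs with
  | nil => intro _; simp
  | cons x xs ih =>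
    intro hsub
    have hx : x ∈ ys := hsub x (List.mem_cons_self)
    have hsub' : ∀ y ∈ xs, y ∈ ys := fun y hy => hsub y (List.mem_cons_of_mem x hy)
    have hcount : ∀ k : Char, ((x :: xs).count k : Int) * g k
        = (xs.count k : Int) * g k + (if k = x then g k else 0) := by
      intro k
      rcases eq_or_ne k x with h | h
      · subst h; simp; ring
      · simp [h, Ne.symm h]
    calc (ys.map (fun k => ((x :: xs).count k : Int) * g k)).sum
        = (ys.map (fun k => (xs.count k : Int) * g k + (if k = x then g k else 0))).sum := by
          congr 1; exact List.map_congr_left (fun k _ => hcount k)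
      _ = (ys.map (fun k => (xs.count k : Int) * g k)).sum
          + (ys.map (fun k => if k = x then g k else 0)).sum := by
          rw [← List.sum_map_add]
      _ = (xs.map g).sum + g x := by rw [ih hsub', sum_ite_mem g x ys hnd hx]
      _ = ((x :: xs).map g).sum := by simp [add_comm]

lemma convert_eq (s f : String) : convert s f = convert_alt s f := by
  simp only [convert, convert_alt]
  rw [PySem.Dict.foldl_insert_getD_add_one_eq_counter, PySem.Dict.items_counter]
  rw [List.foldl_map]
  rw [foldl_add_eq_sum (fun i =>
        f.toList.foldl (fun mini j =>
          let cur := |((j.toNat : Int)) - ((i.toNat : Int))|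
          let cur := if cur ≥ 13 then |cur - 26| else cur
          if cur < mini then cur else mini) 100000) s.toList 0]
  rw [foldl_add_eq_sum (fun k => ((s.toList.count k : Int)) * minDist k f.toList)
        (PySem.Set.ofList s.toList) 0]
  simp only [zero_add]
  have h1 : (s.toList.map (fun i =>
        f.toList.foldl (fun mini j =>
          let cur := |((j.toNat : Int)) - ((i.toNat : Int))|
          let cur := if cur ≥ 13 then |cur - 26| else cur
          if cur < mini then cur else mini) 100000)).sum
      = (s.toList.map (fun i => minDist i f.toList)).sum := by
    congr 1
    exact List.map_congr_left (fun i _ => inner_eq f.toList i 100000)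
  rw [h1]
  exact (group_sum (fun k => minDist k f.toList) (PySem.Set.ofList s.toList)
    (PySem.Set.nodup_ofList s.toList) s.toList
    (fun x hx => (PySem.Set.mem_ofList s.toList x).mpr hx)).symm

-- ===== VERDICT (by name: the statement is the Claim_ definition above) =====
theorem convert_spec : Claim_equal_convert := by
  intro s f _
  unfold Spec_convert
  exact convert_eq s f
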